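-- pv_equiv track=rewrite | github.com/UmbertoTomasini/sparse_hierarchy_model | dataset_creating/hierarchical_s0_bs_S_diffeoB.py | generate_valid_permutations
-- ===== SOURCE A (Python) =====
-- def generate_valid_permutations(s, s0):
--     # Define the range of numbers
--     upper_limit = s * (s0 + 1)
--     numbers = list(range(1, upper_limit + 1))
--
--     # Identify multiples of s0+1
--     multiples = sorted([n for n in numbers if n % (s0 + 1) == 0])
--
--     # Identify non-multiples
--     non_multiples = [n for n in numbers if n % (s0 + 1) != 0]
--
--     # Generate all permutations of non-multiples
--     #non_multiples_perms = non_multiples #permutations(non_multiples)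
--
--     # Function to insert multiples into a permutation at valid positions
--     def insert_multiples(perm, multiples, start=0):
--         if not multiples:
--             # Convert tuple to list and subtract 1 from each element
--             return [list(map(lambda x: x - 1, perm))]
--
--         inserted_perms = []
--         for i in range(start, len(perm) + 1):
--             new_perm = perm[:i] + [multiples[0],] + perm[i:]
--             inserted_perms.extend(insert_multiples(new_perm, multiples[1:], i + 1))
--
--         return inserted_perms
--
--     # Generate all valid permutations as lists with adjustment
--     valid_perms = []
--     #for perm in non_multiples_perms:
--     #    valid_perms.extend(insert_multiples(perm, multiples))
--     valid_perms.extend(insert_multiples(non_multiples, multiples))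
--
--     return valid_perms
-- ===== SOURCE B (Python) =====
-- def generate_valid_permutations(s, s0):
--     d = s0 + 1
--     upper_limit = s * d
--     multiples = [n for n in range(1, upper_limit + 1) if n % d == 0]
--     non_multiples = [n for n in range(1, upper_limit + 1) if n % d != 0]
--     m = len(multiples)
--     nlen = len(non_multiples)
--     # level-wise enumeration, in lexicographic order, of the non-decreasing cut tuples:
--     # the k-th chosen cut c = number of non-multiples placed before the k-th multiple
--     combos = [(0, [])]
--     for _ in range(m):
--         combos = [(c, pre + [c])
--                   for (lo, pre) in combos
--                   for c in range(lo, nlen + 1)]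
--     # assemble each row from slices of the pre-decremented non-multiples
--     mu1 = [x - 1 for x in multiples]
--     nm1 = [x - 1 for x in non_multiples]
--     out = []
--     for _, pre in combos:
--         row = []
--         j = 0
--         for c, mv in zip(pre, mu1):
--             row += nm1[j:c]
--             row.append(mv)
--             j = c
--         row += nm1[j:]
--         out.append(row)
--     return out
-- ===== Notes on version B (the rewrite author's own statement) =====
-- stated objective: alternative
-- what changed: Replaces the recursive depth-first insertion of multiples into ever-growing list copies by a recursion-free level-wise loop that enumerates the cut tuples (number of non-multiples before each multiple) lexicographically, then assembles each output row from slices of the pre-decremented non-multiples.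
import Mathlib
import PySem

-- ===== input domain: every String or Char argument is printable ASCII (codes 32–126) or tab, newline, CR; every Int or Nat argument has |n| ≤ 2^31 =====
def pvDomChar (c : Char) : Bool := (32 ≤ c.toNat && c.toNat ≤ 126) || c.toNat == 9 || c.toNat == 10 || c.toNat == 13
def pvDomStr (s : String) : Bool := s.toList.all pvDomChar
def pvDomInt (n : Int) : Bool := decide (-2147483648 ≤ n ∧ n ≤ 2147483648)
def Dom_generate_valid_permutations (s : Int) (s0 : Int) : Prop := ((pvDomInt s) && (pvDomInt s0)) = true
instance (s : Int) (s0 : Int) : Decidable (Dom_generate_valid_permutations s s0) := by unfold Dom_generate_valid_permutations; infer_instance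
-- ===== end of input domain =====

-- B replaces A's recursive list-slicing insertion of the multiples by a recursion-free
-- level-wise enumeration of the cut tuples plus slice-based row assembly (alternative
-- decomposition); equal return value on every input.

-- ===== PORT A =====

-- insert_multiples(perm, multiples, start): loop i in range(start, len(perm)+1),
-- new_perm = perm[:i] + [multiples[0]] + perm[i:], recurse with start = i+1
def insertA (perm : List Int) (ms : List Int) (start : Int) : List (List Int) :=
  match ms with
  | [] => [perm.map (fun x => x - 1)]
  | m0 :: rest =>
      (PySem.List.pyRange start ((perm.length : Int) + 1) 1).flatMap
        (fun i =>
          insertA (PySem.List.slice perm none (some i) ++ [m0] ++ PySem.List.slice perm (some i) none)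
            rest (i + 1))
  termination_by ms.length
  decreasing_by simp

def generate_valid_permutations (s : Int) (s0 : Int) : List (List Int) :=
  let upper_limit := s * (s0 + 1)
  let numbers := PySem.List.pyRange 1 (upper_limit + 1) 1
  let multiples := PySem.List.sorted (numbers.filter (fun n => PySem.Int.mod n (s0 + 1) == 0)) (fun x => x) false
  let non_multiples := numbers.filter (fun n => PySem.Int.mod n (s0 + 1) != 0)
  insertA non_multiples multiples 0

-- ===== PORT B =====

-- the inner comprehension of B's level loop: extend every (lo, pre) by each next cut c in [lo, nlen]
def extendCombos (nlen : Int) (cs : List (Int × List Int)) : List (Int × List Int) :=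
  cs.flatMap (fun e => (PySem.List.pyRange e.1 (nlen + 1) 1).map (fun c => (c, e.2 ++ [c])))

-- the row-assembly loop: nm1[j:c] ++ [mv] per (cut, multiple) pair, then the tail nm1[j:]
def fillC (nm1 : List Int) : List (Int × Int) → Int → List Int
  | [], j => PySem.List.slice nm1 (some j) none
  | (c, mv) :: ps, j => PySem.List.slice nm1 (some j) (some c) ++ mv :: fillC nm1 ps c

def generate_valid_permutations_alt (s : Int) (s0 : Int) : List (List Int) :=
  let d := s0 + 1
  let upper_limit := s * d
  let multiples := (PySem.List.pyRange 1 (upper_limit + 1) 1).filter (fun n => PySem.Int.mod n d == 0)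
  let non_multiples := (PySem.List.pyRange 1 (upper_limit + 1) 1).filter (fun n => PySem.Int.mod n d != 0)
  let m := multiples.length
  let nlen := (non_multiples.length : Int)
  -- for _ in range(m): combos = [(c, pre+[c]) for (lo,pre) in combos for c in range(lo, nlen+1)]
  let combos := (PySem.List.pyRange 0 (m : Int) 1).foldl (fun cs _ => extendCombos nlen cs) [((0 : Int), ([] : List Int))]
  let mu1 := multiples.map (fun x => x - 1)
  let nm1 := non_multiples.map (fun x => x - 1)
  combos.map (fun e => fillC nm1 (e.2.zip mu1) 0)

-- ===== PRECONDITION & SPEC =====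

def Spec_generate_valid_permutations (s : Int) (s0 : Int) (out : List (List Int)) : Prop := out = generate_valid_permutations_alt s s0
instance (s : Int) (s0 : Int) (out : List (List Int)) : Decidable (Spec_generate_valid_permutations s s0 out) := by unfold Spec_generate_valid_permutations; infer_instance

-- ===== CLAIM (what is proved, stated in full; the proofs are below) =====
def Claim_equal_generate_valid_permutations : Prop := ∀ (s : Int) (s0 : Int), Dom_generate_valid_permutations s s0 → Spec_generate_valid_permutations s s0 (generate_valid_permutations s s0)

-- ===== LEMMAS AND PROOFS =====

-- proof-side: DFS characterization of the non-decreasing cut tuples in [lo, n]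
def cutsB (lo : Int) (n : Int) (m : Nat) : List (List Int) :=
  match m with
  | 0 => [[]]
  | Nat.succ k => (PySem.List.pyRange lo (n + 1) 1).flatMap (fun c => (cutsB c n k).map (fun rest => c :: rest))

-- proof-side: same, carrying the last chosen cut like B's loop state does
def cutsP (lo : Int) (n : Int) (m : Nat) : List (Int × List Int) :=
  match m with
  | 0 => [(lo, [])]
  | Nat.succ k => (PySem.List.pyRange lo (n + 1) 1).flatMap (fun c => (cutsP c n k).map (fun e => (e.1, c :: e.2)))

-- proof-side: B's level loop as iterated extension
def rounds (nlen : Int) (k : Nat) (cs : List (Int × List Int)) : List (Int × List Int) :=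
  match k with
  | 0 => cs
  | Nat.succ k => rounds nlen k (extendCombos nlen cs)

-- proof-side: raw row assembly (undecremented values), slices of perm between the cuts
def asmRaw (perm : List Int) : List (Int × Int) → Int → List Int
  | [], j => PySem.List.slice perm (some j) none
  | (c, v) :: ps, j => PySem.List.slice perm (some j) (some c) ++ v :: asmRaw perm ps c

theorem foldl_const_pyRange (k : Nat) {α : Type} (f : α → α) :
    ∀ (a : Int) (cs : α), (PySem.List.pyRange a (a + (k : Int)) 1).foldl (fun cs _ => f cs) cs
      = Nat.iterate f k cs := by
  induction k with
  | zero => intro a cs; simp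
  | succ k ih =>
      intro a cs
      rw [PySem.List.pyRange_one_cons (by push_cast; omega : a < a + ((k+1 : Nat) : Int))]
      have : a + ((k+1 : Nat) : Int) = (a + 1) + (k : Int) := by push_cast; ring
      rw [List.foldl_cons, this, ih (a + 1) (f cs)]
      simp [Function.iterate_succ_apply]

theorem rounds_eq_iterate (nlen : Int) (k : Nat) (cs : List (Int × List Int)) :
    rounds nlen k cs = Nat.iterate (extendCombos nlen) k cs := by
  induction k generalizing cs with
  | zero => rfl
  | succ k ih => rw [rounds, ih, Function.iterate_succ_apply]

theorem extendCombos_append (nlen : Int) (xs ys : List (Int × List Int)) :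
    extendCombos nlen (xs ++ ys) = extendCombos nlen xs ++ extendCombos nlen ys := by
  simp [extendCombos]

theorem rounds_append (k : Nat) : ∀ (nlen : Int) (xs ys : List (Int × List Int)),
    rounds nlen k (xs ++ ys) = rounds nlen k xs ++ rounds nlen k ys := by
  induction k with
  | zero => intro nlen xs ys; rfl
  | succ k ih => intro nlen xs ys; rw [rounds, extendCombos_append, ih, rounds, rounds]

theorem rounds_nil (k : Nat) (nlen : Int) : rounds nlen k [] = [] := by
  induction k with
  | zero => rfl
  | succ k ih => rw [rounds]; simpa [extendCombos] using ih

theorem rounds_flatMap (k : Nat) (nlen : Int) (cs : List (Int × List Int)) :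
    rounds nlen k cs = cs.flatMap (fun e => rounds nlen k [e]) := by
  induction cs with
  | nil => simp [rounds_nil]
  | cons e cs ih =>
      have : e :: cs = [e] ++ cs := rfl
      rw [this, rounds_append, ih]; simp

-- B's level loop started on one state = the DFS enumeration with that state's prefix prepended
theorem rounds_singleton (k : Nat) : ∀ (nlen lo : Int) (pre : List Int),
    rounds nlen k [(lo, pre)] = (cutsP lo nlen k).map (fun e => (e.1, pre ++ e.2)) := by
  induction k with
  | zero => intro nlen lo pre; simp [rounds, cutsP]
  | succ k ih =>
      intro nlen lo pre
      rw [rounds]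
      have hext : extendCombos nlen [(lo, pre)]
          = (PySem.List.pyRange lo (nlen + 1) 1).map (fun c => (c, pre ++ [c])) := by
        simp [extendCombos]
      rw [hext, rounds_flatMap, List.flatMap_map]
      conv_rhs => rw [cutsP]
      rw [List.map_flatMap]
      apply List.flatMap_congr
      intro c _
      rw [ih nlen c (pre ++ [c]), List.map_map]
      apply List.map_congr_left
      intro e _
      simp

theorem cutsP_snd (m : Nat) : ∀ (lo n : Int),
    (cutsP lo n m).map Prod.snd = cutsB lo n m := by
  induction m with
  | zero => intro lo n; simp [cutsP, cutsB]
  | succ k ih =>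
      intro lo n
      rw [cutsP, cutsB, List.map_flatMap]
      apply List.flatMap_congr
      intro c _
      rw [List.map_map, ← ih c n, List.map_map]
      rfl

theorem cutsB_mem_ge (m : Nat) :
    ∀ (lo n : Int) (cs : List Int), cs ∈ cutsB lo n m → ∀ q ∈ cs, lo ≤ q := by
  induction m with
  | zero =>
      intro lo n cs hcs q hq
      simp [cutsB] at hcs; subst hcs; simp at hq
  | succ k ih =>
      intro lo n cs hcs q hq
      simp [cutsB, PySem.List.mem_pyRange_one] at hcs
      obtain ⟨c, hc, rest, hrest, hcons⟩ := hcs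
      subst hcons
      rcases List.mem_cons.mp hq with h | h
      · omega
      · have := ih c n rest hrest q h; omega

-- shifting all cuts by one = enumerating over a list one longer
theorem cutsB_shift (m : Nat) : ∀ (lo n : Int),
    cutsB (lo + 1) (n + 1) m = (cutsB lo n m).map (List.map (· + 1)) := by
  induction m with
  | zero => intro lo n; simp [cutsB]
  | succ k ih =>
      intro lo n
      rw [cutsB, cutsB]
      have hr : PySem.List.pyRange (lo + 1) (n + 1 + 1) 1 = (PySem.List.pyRange lo (n + 1) 1).map (· + 1) := by
        rw [PySem.List.pyRange_one, PySem.List.pyRange_one, List.map_map]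
        have : (n + 1 + 1 - (lo + 1)) = (n + 1 - lo) := by ring
        rw [this]
        apply List.map_congr_left
        intro c _
        simp; ring
      rw [hr, List.flatMap_map, List.map_flatMap]
      apply List.flatMap_congr
      intro c _
      rw [ih c n, List.map_map, List.map_map]
      rfl

-- dropping/taking past an element inserted at an index ≤ the bounds ignores it
theorem asm_shift (pairs : List (Int × Int)) : ∀ (perm : List Int) (x c j : Int),
    0 ≤ c → c ≤ j → c ≤ (perm.length : Int) → (∀ p ∈ pairs, c ≤ p.1) →
    asmRaw (perm.take c.toNat ++ x :: perm.drop c.toNat) (pairs.map (fun p => (p.1 + 1, p.2))) (j + 1)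
      = asmRaw perm pairs j := by
  induction pairs with
  | nil =>
      intro perm x c j hc0 hcj hclen _
      simp only [List.map_nil, asmRaw]
      rw [PySem.List.slice_from _ (by omega : (0:Int) ≤ j + 1), PySem.List.slice_from _ (by omega : (0:Int) ≤ j)]
      rw [List.drop_append]
      have h1 : (j + 1).toNat - (perm.take c.toNat).length = j.toNat - c.toNat + 1 := by
        simp [List.length_take]; omega
      have h2 : (j+1).toNat ≥ (perm.take c.toNat).length := by simp [List.length_take]; omega
      rw [List.drop_eq_nil_of_le (by simpa using h2), h1]
      simp only [List.nil_append, List.drop_succ_cons, List.drop_drop]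
      congr 1
      omega
  | cons p pairs ih =>
      intro perm x c j hc0 hcj hclen hall
      obtain ⟨c2, v⟩ := p
      have hc2 : c ≤ c2 := hall (c2, v) (by simp)
      simp only [List.map_cons, asmRaw]
      have hslice : PySem.List.slice (perm.take c.toNat ++ x :: perm.drop c.toNat) (some (j + 1)) (some (c2 + 1))
          = PySem.List.slice perm (some j) (some c2) := by
        rw [PySem.List.slice_toNat _ (by omega : (0:Int) ≤ j + 1) (by omega : (0:Int) ≤ c2 + 1),
            PySem.List.slice_toNat _ (by omega : (0:Int) ≤ j) (by omega : (0:Int) ≤ c2)]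
        rw [List.drop_append]
        have h2 : (j+1).toNat ≥ (perm.take c.toNat).length := by simp [List.length_take]; omega
        rw [List.drop_eq_nil_of_le (by simpa using h2)]
        have h1 : (j + 1).toNat - (perm.take c.toNat).length = j.toNat - c.toNat + 1 := by
          simp [List.length_take]; omega
        rw [h1]
        simp only [List.nil_append, List.drop_succ_cons, List.drop_drop]
        have h3 : (c2 + 1).toNat - (j + 1).toNat = c2.toNat - j.toNat := by omega
        rw [h3, show c.toNat + (j.toNat - c.toNat) = j.toNat from by omega]
      rw [hslice, ih perm x c c2 hc0 hc2 hclen (fun q hq => hall q (by simp [hq]))]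

-- prepending one (cut, value) pair = splitting the row at that cut
theorem asm_cons (cs : List Int) (rest : List Int) (perm : List Int) (x c : Int)
    (hc0 : 0 ≤ c) (hclen : c ≤ (perm.length : Int)) (hall : ∀ q ∈ cs, c ≤ q) :
    asmRaw (perm.take c.toNat ++ x :: perm.drop c.toNat) ((cs.map (· + 1)).zip rest) 0
      = PySem.List.slice perm none (some c) ++ x :: asmRaw perm (cs.zip rest) c := by
  match cs, rest with
  | [], _ =>
      simp only [List.map_nil, List.zip_nil_left, asmRaw]
      rw [PySem.List.slice_from _ (le_refl (0:Int)), PySem.List.slice_to _ hc0,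
          PySem.List.slice_from _ hc0]
      simp
  | _ :: _, [] =>
      simp only [List.map_cons, List.zip_nil_right, asmRaw]
      rw [PySem.List.slice_from _ (le_refl (0:Int)), PySem.List.slice_to _ hc0,
          PySem.List.slice_from _ hc0]
      simp
  | c2 :: cs', v :: rest' =>
      have hc2 : c ≤ c2 := hall c2 (by simp)
      simp only [List.map_cons, List.zip_cons_cons, asmRaw]
      have hsplit : PySem.List.slice (perm.take c.toNat ++ x :: perm.drop c.toNat) (some 0) (some (c2 + 1))
          = (PySem.List.slice perm none (some c) ++ x :: PySem.List.slice perm (some c) (some c2)) := by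
        rw [PySem.List.slice_toNat _ (le_refl (0:Int)) (by omega : (0:Int) ≤ c2 + 1),
            PySem.List.slice_to _ hc0, PySem.List.slice_toNat _ hc0 (by omega : (0:Int) ≤ c2)]
        simp only [Int.toNat_zero, List.drop_zero, Nat.sub_zero]
        rw [List.take_append]
        have h1 : (c2+1).toNat - (perm.take c.toNat).length = c2.toNat - c.toNat + 1 ∨ perm.length ≤ c.toNat := by
          simp [List.length_take]; omega
      -- the inserted element is kept: take (c2+1) of the concatenation keeps all of take c, then x, then c2 - c more
        have htk : (perm.take c.toNat).take (c2+1).toNat = perm.take c.toNat := by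
          apply List.take_of_length_le
          simp [List.length_take]; omega
        rw [htk]
        congr 1
        have h2 : (c2 + 1).toNat - (perm.take c.toNat).length = c2.toNat - c.toNat + 1 := by
          simp [List.length_take]
          omega
        rw [h2]
        simp
      rw [hsplit, List.append_assoc]
      congr 2
      simp only [List.cons_append]
      congr 1
      have := asm_shift (cs'.zip rest') perm x c c2 hc0 hc2 hclen
        (fun q hq => hall q.1 (List.mem_cons_of_mem _ (List.of_mem_zip hq).1))
      rw [← this, List.zip_map_left]
      have hmm : List.map (Prod.map (fun y => y + 1) id) (cs'.zip rest')
          = List.map (fun p : Int × Int => (p.1 + 1, p.2)) (cs'.zip rest') := by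
        apply List.map_congr_left
        intro e _
        simp [Prod.map]
      rw [hmm]

-- the main correspondence: A's recursive insertion = cut enumeration + slice assembly
theorem insertA_eq (ms : List Int) :
    ∀ (perm : List Int) (a : Int), 0 ≤ a →
    insertA perm ms a
      = (cutsB a (perm.length : Int) ms.length).map
          (fun cs => (asmRaw perm (cs.zip ms) 0).map (fun x => x - 1)) := by
  induction ms with
  | nil =>
      intro perm a _
      simp only [insertA, List.length_nil, cutsB, List.map_cons, List.map_nil, List.zip_nil_right,
        asmRaw]
      rw [PySem.List.slice_from _ (le_refl (0:Int))]
      simp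
  | cons m0 rest ih =>
      intro perm a ha
      rw [insertA]
      conv_rhs => rw [show (m0 :: rest).length = Nat.succ rest.length from rfl, cutsB]
      rw [List.map_flatMap]
      apply List.flatMap_congr
      intro c hc
      rw [PySem.List.mem_pyRange_one] at hc
      have hc0 : 0 ≤ c := by omega
      have hclen : c ≤ (perm.length : Int) := by omega
      have hslice : PySem.List.slice perm none (some c) ++ [m0] ++ PySem.List.slice perm (some c) none
          = perm.take c.toNat ++ m0 :: perm.drop c.toNat := by
        rw [PySem.List.slice_to perm hc0, PySem.List.slice_from perm hc0]
        simp
      rw [hslice, ih _ (c + 1) (by omega)]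
      have hlen' : ((perm.take c.toNat ++ m0 :: perm.drop c.toNat).length : Int) = (perm.length : Int) + 1 := by
        simp
        try omega
      rw [hlen', cutsB_shift, List.map_map, List.map_map]
      apply List.map_congr_left
      intro cs hcs
      have hge := cutsB_mem_ge rest.length c _ cs hcs
      simp only [Function.comp]
      rw [asm_cons cs rest perm m0 c hc0 hclen hge]
      simp only [asmRaw, List.zip_cons_cons]
      rfl

-- decremented-copy assembly = raw assembly then decrement
theorem fillC_eq_asm (pairs : List (Int × Int)) : ∀ (nonm : List Int) (j : Int),
    0 ≤ j → (∀ p ∈ pairs, 0 ≤ p.1) →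
    fillC (nonm.map (fun x => x - 1)) (pairs.map (fun p => (p.1, p.2 - 1))) j
      = (asmRaw nonm pairs j).map (fun x => x - 1) := by
  induction pairs with
  | nil =>
      intro nonm j hj _
      simp only [List.map_nil, fillC, asmRaw]
      rw [PySem.List.slice_from _ hj, PySem.List.slice_from _ hj, List.map_drop]
  | cons p pairs ih =>
      intro nonm j hj hall
      obtain ⟨c, v⟩ := p
      have hc0 : (0:Int) ≤ c := hall (c, v) (by simp)
      simp only [List.map_cons, fillC, asmRaw, List.map_append, List.map_cons]
      rw [PySem.List.slice_toNat _ hj hc0, PySem.List.slice_toNat _ hj hc0]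
      rw [ih nonm c hc0 (fun q hq => hall q (by simp [hq]))]
      congr 1
      rw [← List.map_drop, ← List.map_take]

-- the filtered range is strictly increasing, so A's sorted() is the identity on it
theorem sorted_filter_range (u : Int) (p : Int → Bool) :
    PySem.List.sorted ((PySem.List.pyRange 1 (u + 1) 1).filter p) (fun x => x) false
      = (PySem.List.pyRange 1 (u + 1) 1).filter p := by
  apply PySem.List.sorted_eq_self_of_pairwise
  have h := PySem.List.pairwise_lt_pyRange_one 1 (u + 1)
  exact (h.filter p).imp (fun h => le_of_lt h)

-- assembling the raw rows then decrementing = B's map over the enumerated loop states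
theorem final_map (nonm mult : List Int) :
    (cutsB 0 (nonm.length : Int) mult.length).map
        (fun cs => (asmRaw nonm (cs.zip mult) 0).map (fun x => x - 1))
      = (cutsP 0 (nonm.length : Int) mult.length).map
          ((fun e : Int × List Int =>
              fillC (nonm.map (fun x => x - 1)) (e.2.zip (mult.map (fun x => x - 1))) 0)
            ∘ (fun e : Int × List Int => (e.1, ([] : List Int) ++ e.2))) := by
  have hcomp : ((fun e : Int × List Int =>
        fillC (nonm.map (fun x => x - 1)) (e.2.zip (mult.map (fun x => x - 1))) 0)
      ∘ (fun e : Int × List Int => (e.1, ([] : List Int) ++ e.2)))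
      = ((fun cs => fillC (nonm.map (fun x => x - 1)) (cs.zip (mult.map (fun x => x - 1))) 0)
          ∘ Prod.snd) := by
    funext e; simp
  rw [hcomp, ← List.map_map, cutsP_snd]
  apply List.map_congr_left
  intro cs hcs
  have h0 := cutsB_mem_ge mult.length 0 _ cs hcs
  rw [List.zip_map_right]
  have hzip : (cs.zip mult).map (Prod.map id (fun x => x - 1))
      = (cs.zip mult).map (fun p : Int × Int => (p.1, p.2 - 1)) := by
    apply List.map_congr_left
    intro e _
    simp [Prod.map]
  rw [hzip, fillC_eq_asm _ nonm 0 le_rfl (fun p hp => h0 p.1 (List.of_mem_zip hp).1)]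

-- ===== VERDICT (by name: the statement is the Claim_ definition above) =====
theorem generate_valid_permutations_spec : Claim_equal_generate_valid_permutations := by
  intro s s0 _
  unfold Spec_generate_valid_permutations generate_valid_permutations generate_valid_permutations_alt
  simp only []
  rw [sorted_filter_range]
  rw [insertA_eq _ _ 0 le_rfl]
  rw [show ∀ (n : Int) (m : Nat) (cs : List (Int × List Int)),
        (PySem.List.pyRange 0 (m : Int) 1).foldl (fun cs _ => extendCombos n cs) cs
          = Nat.iterate (extendCombos n) m cs
      from fun n m cs => by
        have := foldl_const_pyRange m (extendCombos n) 0 cs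
        simpa using this]
  rw [← rounds_eq_iterate, rounds_singleton, List.map_map]
  exact final_map _ _
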